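-- pv_equiv track=rewrite | github.com/bukinator-dev/movie-aggregator-service | services/youtube_service.py | categorize_interviews
-- ===== SOURCE A (Python) =====
-- from typing import Optional, List, Dict, Any
--
-- def categorize_interviews(interviews: List[Dict[str, Any]]) -> Dict[str, int]:
--     """
--     Categorize interviews by type for better organization
--
--     Returns count of interviews by category
--     """
--     categories = {
--         'press_junket': 0,
--         'talk_show': 0,
--         'podcast': 0,
--         'red_carpet': 0,
--         'behind_scenes': 0,
--         'q_and_a': 0,
--         'documentary': 0,
--         'other': 0
--     }
--
--     for interview in interviews:
--         title = interview.get('title', '').lower()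
--         description = interview.get('description', '').lower()
--         channel = interview.get('channel_title', '').lower()
--
--         # Categorize based on title, description, and channel
--         if any(word in title for word in ['junket', 'press', 'roundtable']):
--             categories['press_junket'] += 1
--         elif any(word in title for word in ['talk show', 'late night', 'tonight show', 'ellen']):
--             categories['talk_show'] += 1
--         elif any(word in title for word in ['podcast', 'episode']):
--             categories['podcast'] += 1
--         elif any(word in title for word in ['red carpet', 'premiere', 'awards']):
--             categories['red_carpet'] += 1
--         elif any(word in title for word in ['behind the scenes', 'bts', 'making of']):
--             categories['behind_scenes'] += 1
--         elif any(word in title for word in ['q&a', 'qa', 'question']):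
--             categories['q_and_a'] += 1
--         elif any(word in title for word in ['documentary', 'biography']):
--             categories['documentary'] += 1
--         else:
--             categories['other'] += 1
--
--     # Remove categories with 0 count
--     return {k: v for k, v in categories.items() if v > 0}
-- ===== SOURCE B (Python) =====
-- from typing import Optional, List, Dict, Any
--
-- _RULES = [
--     ('press_junket', ['junket', 'press', 'roundtable']),
--     ('talk_show', ['talk show', 'late night', 'tonight show', 'ellen']),
--     ('podcast', ['podcast', 'episode']),
--     ('red_carpet', ['red carpet', 'premiere', 'awards']),
--     ('behind_scenes', ['behind the scenes', 'bts', 'making of']),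
--     ('q_and_a', ['q&a', 'qa', 'question']),
--     ('documentary', ['documentary', 'biography']),
-- ]
--
-- def _cascade(rules, titles):
--     """Partition cascade: each rule pulls its matching titles out of the pool,
--     the leftover pool falls through to the next rule; whatever survives is 'other'."""
--     if not rules:
--         return [('other', len(titles))] if titles else []
--     cat, words = rules[0]
--     matched = [t for t in titles if any(w in t for w in words)]
--     remaining = [t for t in titles if not any(w in t for w in words)]
--     entry = [(cat, len(matched))] if matched else []
--     return entry + _cascade(rules[1:], remaining)
--
-- def categorize_interviews(interviews: List[Dict[str, Any]]) -> Dict[str, int]: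
--     titles = [iv.get('title', '').lower() for iv in interviews]
--     return dict(_cascade(_RULES, titles))
-- ===== Notes on version B (the rewrite author's own statement) =====
-- stated objective: alternative
-- what changed: Replaces A's interview-major if/elif counting loop over a pre-seeded counter dict by a category-major recursive partition cascade: each rule filters its matching titles out of the remaining pool and emits its count, the final leftover pool becomes 'other'.
import Mathlib
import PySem

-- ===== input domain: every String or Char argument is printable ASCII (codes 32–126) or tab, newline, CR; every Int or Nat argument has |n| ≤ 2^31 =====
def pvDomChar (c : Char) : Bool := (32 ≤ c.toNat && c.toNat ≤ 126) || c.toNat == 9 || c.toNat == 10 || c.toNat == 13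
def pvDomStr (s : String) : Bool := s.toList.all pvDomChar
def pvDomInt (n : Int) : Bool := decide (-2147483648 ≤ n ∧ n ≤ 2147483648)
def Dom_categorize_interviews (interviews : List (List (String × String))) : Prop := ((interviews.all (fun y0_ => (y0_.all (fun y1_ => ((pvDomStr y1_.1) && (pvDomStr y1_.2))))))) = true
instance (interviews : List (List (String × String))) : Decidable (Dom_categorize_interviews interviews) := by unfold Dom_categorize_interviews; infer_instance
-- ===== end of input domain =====

-- B replaces A's interview-major if/elif counting loop by a category-major recursive
-- partition cascade over the rule list (objective: alternative, same cost).

-- ===== PORT A =====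
-- any(word in title for word in ws)
def pvWordIn (title : String) (ws : List String) : Bool :=
  ws.any (fun w => PySem.Str.isIn w title)

-- the initial 'categories' dict literal of A
def pvCategories0 : PySem.Dict String Int :=
  PySem.Dict.ofList
    [("press_junket", 0), ("talk_show", 0), ("podcast", 0), ("red_carpet", 0),
     ("behind_scenes", 0), ("q_and_a", 0), ("documentary", 0), ("other", 0)]

-- the body of A's for-loop; 'categories[k] += 1' is Dict.modify (the key is always present)
def pvBodyA (categories : PySem.Dict String Int) (interview : List (String × String)) :
    PySem.Dict String Int :=
  let title := PySem.Str.lower ((interview.lookup "title").getD "")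
  let _description := PySem.Str.lower ((interview.lookup "description").getD "")   -- computed by A, never used
  let _channel := PySem.Str.lower ((interview.lookup "channel_title").getD "")     -- computed by A, never used
  if pvWordIn title ["junket", "press", "roundtable"] then
    categories.modify "press_junket" 0 (· + 1)
  else if pvWordIn title ["talk show", "late night", "tonight show", "ellen"] then
    categories.modify "talk_show" 0 (· + 1)
  else if pvWordIn title ["podcast", "episode"] then
    categories.modify "podcast" 0 (· + 1)
  else if pvWordIn title ["red carpet", "premiere", "awards"] then
    categories.modify "red_carpet" 0 (· + 1)
  else if pvWordIn title ["behind the scenes", "bts", "making of"] then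
    categories.modify "behind_scenes" 0 (· + 1)
  else if pvWordIn title ["q&a", "qa", "question"] then
    categories.modify "q_and_a" 0 (· + 1)
  else if pvWordIn title ["documentary", "biography"] then
    categories.modify "documentary" 0 (· + 1)
  else
    categories.modify "other" 0 (· + 1)

-- literal port of A
def categorize_interviews (interviews : List (List (String × String))) : List (String × Int) :=
  let categories := interviews.foldl pvBodyA pvCategories0
  categories.items.filter (fun kv => decide (0 < kv.2))

-- ===== PORT B =====
def pvRules : List (String × List String) :=
  [("press_junket", ["junket", "press", "roundtable"]),
   ("talk_show", ["talk show", "late night", "tonight show", "ellen"]),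
   ("podcast", ["podcast", "episode"]),
   ("red_carpet", ["red carpet", "premiere", "awards"]),
   ("behind_scenes", ["behind the scenes", "bts", "making of"]),
   ("q_and_a", ["q&a", "qa", "question"]),
   ("documentary", ["documentary", "biography"])]

-- any(w in t for w in ws)
def pvMatch (ws : List String) (t : String) : Bool :=
  ws.any (fun w => PySem.Str.isIn w t)

-- B's _cascade: each rule pulls its matching titles out of the pool; leftovers are 'other'
def pvCascade : List (String × List String) → List String → List (String × Int)
  | [], titles => if titles.isEmpty then [] else [("other", (titles.length : Int))]
  | (cat, words) :: rest, titles =>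
    let matched := titles.filter (pvMatch words)
    let remaining := titles.filter (fun t => !(pvMatch words t))
    (if matched.isEmpty then [] else [(cat, (matched.length : Int))]) ++ pvCascade rest remaining

def categorize_interviews_alt (interviews : List (List (String × String))) : List (String × Int) :=
  let titles := interviews.map (fun iv => PySem.Str.lower ((iv.lookup "title").getD ""))
  pvCascade pvRules titles

-- ===== PRECONDITION & SPEC =====
def Spec_categorize_interviews (interviews : List (List (String × String))) (out : List (String × Int)) : Prop := out = categorize_interviews_alt interviews
instance (interviews : List (List (String × String))) (out : List (String × Int)) : Decidable (Spec_categorize_interviews interviews out) := by unfold Spec_categorize_interviews; infer_instance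

-- ===== CLAIM (what is proved, stated in full; the proofs are below) =====
def Claim_equal_categorize_interviews : Prop := ∀ (interviews : List (List (String × String))), Dom_categorize_interviews interviews → Spec_categorize_interviews interviews (categorize_interviews interviews)

-- ===== LEMMAS AND PROOFS =====

-- the canonical key order (keys of A's initial dict = B's rule order plus 'other')
def pvCanon : List String :=
  ["press_junket", "talk_show", "podcast", "red_carpet",
   "behind_scenes", "q_and_a", "documentary", "other"]

-- proof-side classifier: the first rule whose word list matches, else 'other'
def pvClassify : List (String × List String) → String → String
  | [], _ => "other"
  | (cat, words) :: rest, title =>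
    if pvMatch words title then cat else pvClassify rest title

-- the category of one interview under A's if/elif chain
def pvKey (iv : List (String × String)) : String :=
  pvClassify pvRules (PySem.Str.lower ((iv.lookup "title").getD ""))

lemma pvClassify_mem (rules : List (String × List String)) (t : String) :
    pvClassify rules t ∈ rules.map (·.1) ++ ["other"] := by
  induction rules with
  | nil => simp [pvClassify]
  | cons r rest ih =>
    obtain ⟨c, ws⟩ := r
    simp only [pvClassify]
    split_ifs <;> simp_all

lemma pvClassify_pvRules_mem (t : String) : pvClassify pvRules t ∈ pvCanon :=
  pvClassify_mem pvRules t

lemma pvCategories0_contains {k : String} (h : k ∈ pvCanon) :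
    pvCategories0.contains k = true := by
  simp only [pvCanon, List.mem_cons, List.not_mem_nil, or_false] at h
  rcases h with h | h | h | h | h | h | h | h <;> subst h <;> decide

lemma pvCategories0_getD {k : String} (h : k ∈ pvCanon) :
    pvCategories0.getD k 0 = 0 := by
  simp only [pvCanon, List.mem_cons, List.not_mem_nil, or_false] at h
  rcases h with h | h | h | h | h | h | h | h <;> subst h <;> decide

lemma pvBodyA_eq (d : PySem.Dict String Int) (iv : List (String × String)) :
    pvBodyA d iv = d.modify (pvKey iv) 0 (· + 1) := by
  simp only [pvBodyA, pvKey, pvRules, pvClassify, pvWordIn, pvMatch]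
  split_ifs <;> rfl

lemma pvKeysFoldl (ks : List String) (d : PySem.Dict String Int)
    (h : ∀ x ∈ ks, d.contains x = true) :
    (ks.foldl (fun d x => d.modify x 0 (· + 1)) d).keys = d.keys := by
  induction ks generalizing d with
  | nil => rfl
  | cons x ks ih =>
    have hx : d.contains x = true := h x (List.mem_cons_self ..)
    rw [List.foldl_cons, ih]
    · rw [PySem.Dict.keys_modify, PySem.Dict.keys_insert_of_contains _ _ hx]
    · intro y hy
      rw [PySem.Dict.contains_modify]
      simp [h y (List.mem_cons_of_mem _ hy)]

-- B's cascade computes, for each category in order, the number of titles classified to it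
lemma pvCascade_eq (rules : List (String × List String)) (titles : List String)
    (h : ("other" :: rules.map (·.1)).Nodup) :
    pvCascade rules titles =
      ((rules.map (·.1) ++ ["other"]).map
          (fun k => (k, ((titles.map (pvClassify rules)).count k : Int)))).filter
        (fun kv => decide (0 < kv.2)) := by
  induction rules generalizing titles with
  | nil =>
    have hcnt : (titles.map (pvClassify [])).count "other" = titles.length := by
      rw [List.count_eq_countP, List.countP_map]
      rw [show ((fun x => x == "other") ∘ pvClassify []) = fun _ => true from by
        funext t; simp [pvClassify]]
      simp
    simp only [pvCascade, List.map_nil, List.nil_append, List.map_cons,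
      List.filter_cons, List.filter_nil, hcnt]
    rcases titles with _ | ⟨t, ts⟩ <;> simp
  | cons r rest ih =>
    obtain ⟨c, ws⟩ := r
    have h' := h
    simp only [List.map_cons, List.nodup_cons, List.mem_cons, not_or] at h'
    obtain ⟨⟨hoc, hoL⟩, hcL, hL⟩ := h'
    have hcO : c ≠ "other" := fun e => hoc e.symm
    -- count of c over titles = number of matched titles
    have hcount_c : (titles.map (pvClassify ((c, ws) :: rest))).count c
        = (titles.filter (pvMatch ws)).length := by
      rw [List.count_eq_countP, List.countP_map, ← List.countP_eq_length_filter]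
      apply List.countP_congr
      intro t _
      simp only [Function.comp, pvClassify]
      by_cases hm : pvMatch ws t
      · simp [hm]
      · have hne : pvClassify rest t ≠ c := by
          intro e
          have hmem := pvClassify_mem rest t
          rw [e] at hmem
          simp only [List.mem_append, List.mem_singleton] at hmem
          rcases hmem with h2 | h2
          · exact hcL h2
          · exact hcO h2
        simp [hm, hne]
    -- count of any other key k over titles = count over the remaining pool
    have hcount_k : ∀ k, k ≠ c →
        (titles.map (pvClassify ((c, ws) :: rest))).count k
          = ((titles.filter (fun t => !(pvMatch ws t))).map (pvClassify rest)).count k := by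
      intro k hk
      rw [List.count_eq_countP, List.count_eq_countP, List.countP_map, List.countP_map,
        List.countP_filter]
      apply List.countP_congr
      intro t _
      simp only [Function.comp, pvClassify]
      by_cases hm : pvMatch ws t
      · simp [hm, Ne.symm hk]
      · simp [hm]
    have hIH := ih (titles.filter (fun t => !(pvMatch ws t)))
      (List.nodup_cons.mpr ⟨by simpa using hoL, hL⟩)
    have htail : ((rest.map (·.1) ++ ["other"]).map
          (fun k => (k, ((titles.map (pvClassify ((c, ws) :: rest))).count k : Int))))
        = ((rest.map (·.1) ++ ["other"]).map
          (fun k => (k, (((titles.filter (fun t => !(pvMatch ws t))).map (pvClassify rest)).count k : Int)))) := by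
      apply List.map_congr_left
      intro k hk
      have hkc : k ≠ c := by
        simp only [List.mem_append, List.mem_singleton] at hk
        rcases hk with h2 | h2
        · exact fun e => hcL (by rw [← e]; exact h2)
        · exact fun e => hcO (by rw [← e]; exact h2)
      rw [hcount_k k hkc]
    simp only [pvCascade, List.map_cons, List.cons_append, List.filter_cons, hcount_c,
      htail, hIH]
    have hhead : (decide (0 < ((titles.filter (pvMatch ws)).length : Int)))
        = !(titles.filter (pvMatch ws)).isEmpty := by
      rcases (titles.filter (pvMatch ws)) with _ | _ <;> simp
    rw [hhead]
    rcases (titles.filter (pvMatch ws)).isEmpty with _ | _ <;> simp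

theorem categorize_interviews_spec : Claim_equal_categorize_interviews := by
  intro ivs _
  unfold Spec_categorize_interviews categorize_interviews categorize_interviews_alt
  -- A's loop, rewritten over the list of per-interview categories
  have hA : ivs.foldl pvBodyA pvCategories0
      = (ivs.map pvKey).foldl (fun d x => d.modify x 0 (· + 1)) pvCategories0 := by
    rw [List.foldl_map]
    congr 1
    funext d iv
    exact pvBodyA_eq d iv
  set ks := ivs.map pvKey with hks
  have hmem : ∀ x ∈ ks, pvCategories0.contains x = true := by
    intro x hx
    rcases List.mem_map.mp hx with ⟨iv, _, rfl⟩
    exact pvCategories0_contains (pvClassify_pvRules_mem _)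
  have hkeys : (ks.foldl (fun d x => d.modify x 0 (· + 1)) pvCategories0).keys = pvCanon := by
    rw [pvKeysFoldl ks pvCategories0 hmem]; rfl
  have hnd : (ks.foldl (fun d x => d.modify x 0 (· + 1)) pvCategories0).keys.Nodup := by
    rw [hkeys]; decide
  have hitems := PySem.Dict.items_eq_map_keys _ hnd (0 : Int)
  rw [hkeys] at hitems
  have hvals : (pvCanon.map (fun k =>
        (k, (ks.foldl (fun d x => d.modify x 0 (· + 1)) pvCategories0).getD k 0)))
      = pvCanon.map (fun k => (k, (ks.count k : Int))) := by
    apply List.map_congr_left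
    intro k hk
    rw [PySem.Dict.getD_foldl_modify_add_one, pvCategories0_getD hk, zero_add]
  -- B's cascade over the same title list
  have hB := pvCascade_eq pvRules
      (ivs.map (fun iv => PySem.Str.lower ((iv.lookup "title").getD ""))) (by decide)
  have hkk : (ivs.map (fun iv => PySem.Str.lower ((iv.lookup "title").getD ""))).map
      (pvClassify pvRules) = ks := by
    rw [hks, List.map_map]; rfl
  have hcanon : pvRules.map (·.1) ++ ["other"] = pvCanon := by rfl
  rw [hkk, hcanon] at hB
  simp only [hA, hitems, hvals, hB]
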